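-- pv_equiv track=rewrite | github.com/thangquang09/vietnamese-f5tts-voice-design | capspeech/nar/batch_generate_vn.py | text_to_chars
-- ===== SOURCE A (Python) =====
-- def text_to_chars(text: str) -> list[str]:
--     chars = []
--     for ch in text.lower():
--         if ch == " ":
--             chars.append("<BLK>")
--         else:
--             chars.append(ch)
--     return chars
-- ===== SOURCE B (Python) =====
-- def text_to_chars(text: str) -> list[str]:
--     words = text.lower().split(" ")
--     out = []
--     for i, w in enumerate(words):
--         if i > 0:
--             out.append("<BLK>")
--         out.extend(w)
--     return out
-- ===== Notes on version B (the rewrite author's own statement) =====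
-- stated objective: alternative
-- what changed: Replaces the per-character space/non-space branch with a split-on-space pass followed by interleaving '<BLK>' between the character lists of consecutive fragments.
import Mathlib
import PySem

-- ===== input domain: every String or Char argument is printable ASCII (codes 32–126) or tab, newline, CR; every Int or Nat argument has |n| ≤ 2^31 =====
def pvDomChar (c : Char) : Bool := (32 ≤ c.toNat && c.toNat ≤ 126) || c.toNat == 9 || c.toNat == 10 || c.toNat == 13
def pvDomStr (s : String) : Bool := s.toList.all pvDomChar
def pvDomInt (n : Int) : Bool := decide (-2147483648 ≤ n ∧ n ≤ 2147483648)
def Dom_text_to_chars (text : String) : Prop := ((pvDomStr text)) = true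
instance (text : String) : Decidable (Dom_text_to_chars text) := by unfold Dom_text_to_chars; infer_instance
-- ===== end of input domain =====

-- B replaces A's per-character space/non-space branch with split-on-space then interleaving '<BLK>' between fragments (alternative decomposition, same cost).

-- ===== PORT A =====
-- for ch in text.lower(): if ch == " ": chars.append("<BLK>") else: chars.append(ch)
def text_to_chars (text : String) : List String :=
  (PySem.Str.lower text).toList.foldl
    (fun chars ch =>
      if ch == ' ' then chars ++ ["<BLK>"] else chars ++ [String.ofList [ch]])
    []

-- ===== PORT B =====
-- words = text.lower().split(" "); for i, w in enumerate(words): if i > 0: out.append("<BLK>"); out.extend(w)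
def text_to_chars_alt (text : String) : List String :=
  let words := PySem.Chars.splitOn (PySem.Str.lower text).toList [' ']
  (PySem.List.enumerate words 0).foldl
    (fun out iw =>
      (if iw.1 > 0 then out ++ ["<BLK>"] else out) ++ iw.2.map (fun c => String.ofList [c]))
    []

-- ===== PRECONDITION & SPEC =====
def Spec_text_to_chars (text : String) (out : List String) : Prop := out = text_to_chars_alt text
instance (text : String) (out : List String) : Decidable (Spec_text_to_chars text out) := by unfold Spec_text_to_chars; infer_instance

-- ===== CLAIM (what is proved, stated in full; the proofs are below) =====
def Claim_equal_text_to_chars : Prop := ∀ (text : String), Dom_text_to_chars text → Spec_text_to_chars text (text_to_chars text)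

-- ===== LEMMAS AND PROOFS =====

-- the per-character value A appends
def pvTok (c : Char) : String := if c = ' ' then "<BLK>" else String.ofList [c]

-- simple structural split on ' ' (proof-side model of PySem.Chars.splitOn · [' '])
def pvSp : List Char → List (List Char)
  | [] => [[]]
  | c :: rest =>
      if c = ' ' then [] :: pvSp rest
      else match pvSp rest with
           | [] => [[c]]
           | w :: ws => (c :: w) :: ws

theorem pvSp_ne_nil (l : List Char) : pvSp l ≠ [] := by
  cases l with
  | nil => simp [pvSp]
  | cons c rest =>
      simp only [pvSp]
      split
      · simp
      · cases h : pvSp rest <;> simp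

-- splitOn.go with sep [' '] computed from pvSp (fuel never runs out)
theorem pv_go_eq (fuel : Nat) (l cur : List Char) (acc : List (List Char))
    (hf : l.length < fuel) :
    PySem.Chars.splitOn.go [' '] fuel l cur acc =
      acc.reverse ++
        (match pvSp l with
         | [] => []
         | w :: ws => (cur.reverse ++ w) :: ws) := by
  induction fuel generalizing l cur acc with
  | zero => omega
  | succ n ih =>
      cases l with
      | nil =>
          simp [PySem.Chars.splitOn.go, pvSp]
      | cons c rest =>
          by_cases hc : c = ' '
          · subst hc
            have hp : [' '].isPrefixOf (' ' :: rest) = true := by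
              simp [List.isPrefixOf]
            simp only [PySem.Chars.splitOn.go, hp, if_pos]
            rw [show List.drop [' '].length (' ' :: rest) = rest from rfl]
            rw [ih rest [] (cur.reverse :: acc) (by simpa using Nat.lt_of_succ_lt_succ hf)]
            cases h : pvSp rest with
            | nil => exact absurd h (pvSp_ne_nil rest)
            | cons w ws =>
                simp [pvSp, h]
          · have hp : [' '].isPrefixOf (c :: rest) = false := by
              simp [List.isPrefixOf]
              intro h; exact hc h.symm
            simp only [PySem.Chars.splitOn.go, hp]
            rw [ih rest (c :: cur) acc (by simpa using Nat.lt_of_succ_lt_succ hf)]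
            cases h : pvSp rest with
            | nil => exact absurd h (pvSp_ne_nil rest)
            | cons w ws =>
                simp [pvSp, hc, h]

theorem pv_splitOn_eq (l : List Char) :
    PySem.Chars.splitOn l [' '] = pvSp l := by
  unfold PySem.Chars.splitOn
  rw [pv_go_eq (l.length + 1) l [] [] (by omega)]
  cases h : pvSp l with
  | nil => exact absurd h (pvSp_ne_nil l)
  | cons w ws => simp

-- A's fold is acc ++ map pvTok
theorem pvA_fold (cs : List Char) (acc : List String) :
    cs.foldl
      (fun chars ch =>
        if ch == ' ' then chars ++ ["<BLK>"] else chars ++ [String.ofList [ch]])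
      acc = acc ++ cs.map pvTok := by
  induction cs generalizing acc with
  | nil => simp
  | cons c rest ih =>
      simp only [List.foldl_cons]
      by_cases hc : c = ' '
      · rw [if_pos (by simp [hc]), ih]
        simp [pvTok, hc]
      · rw [if_neg (by simp [hc]), ih]
        simp [pvTok, hc]

-- B's fold over the tail words (all indices ≥ 1, so each word is preceded by "<BLK>")
theorem pvB_fold_tail (ws : List (List Char)) (s : Int) (hs : 1 ≤ s) (acc : List String) :
    (PySem.List.enumerate ws s).foldl
      (fun out iw =>
        (if iw.1 > 0 then out ++ ["<BLK>"] else out) ++ iw.2.map (fun c => String.ofList [c]))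
      acc =
      acc ++ ws.flatMap (fun w => "<BLK>" :: w.map (fun c => String.ofList [c])) := by
  induction ws generalizing s acc with
  | nil => simp [PySem.List.enumerate_nil]
  | cons w ws ih =>
      rw [PySem.List.enumerate_cons]
      simp only [List.foldl_cons]
      have hpos : (s > 0) := by omega
      rw [if_pos hpos]
      rw [ih (s + 1) (by omega)]
      simp

-- interleaving pvSp's fragments gives the per-character map
theorem pv_interleave (cs : List Char) :
    (match pvSp cs with
     | [] => []
     | w :: ws =>
         w.map (fun c => String.ofList [c]) ++
           ws.flatMap (fun w => "<BLK>" :: w.map (fun c => String.ofList [c]))) =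
      cs.map pvTok := by
  induction cs with
  | nil => simp [pvSp]
  | cons c rest ih =>
      by_cases hc : c = ' '
      · subst hc
        simp only [pvSp, if_pos rfl]
        cases h : pvSp rest with
        | nil => exact absurd h (pvSp_ne_nil rest)
        | cons w ws =>
            rw [h] at ih
            simp only [List.map_cons, List.map_nil, List.nil_append]
            rw [← ih]
            simp [pvTok]
      · simp only [pvSp, if_neg hc]
        cases h : pvSp rest with
        | nil => exact absurd h (pvSp_ne_nil rest)
        | cons w ws =>
            rw [h] at ih
            simp only [List.map_cons, List.cons_append]
            rw [← ih]
            simp [pvTok, hc]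

-- ===== VERDICT (by name: the statement is the Claim_ definition above) =====
theorem text_to_chars_spec : Claim_equal_text_to_chars := by
  intro text _
  unfold Spec_text_to_chars text_to_chars text_to_chars_alt
  set cs := (PySem.Str.lower text).toList with hcs
  rw [pvA_fold cs []]
  rw [pv_splitOn_eq cs]
  cases h : pvSp cs with
  | nil => exact absurd h (pvSp_ne_nil cs)
  | cons w ws =>
      dsimp only
      rw [PySem.List.enumerate_cons]
      simp only [List.foldl_cons]
      rw [if_neg (by omega)]
      rw [pvB_fold_tail ws (0 + 1) (by omega)]
      have := pv_interleave cs
      rw [h] at this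
      simpa using this.symm
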